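-- pv_equiv track=rewrite | github.com/SKYJ0/GOL_EVENTS_PROV2.1 | legacy_python/generate_stock_report.py | resolve_sector
-- ===== SOURCE A (Python) =====
-- def resolve_sector(order_sector, available_sectors):
--     if order_sector in available_sectors:
--         return order_sector
--     for s in available_sectors:
--         if s.lower() == order_sector.lower():
--             return s
--     for s in available_sectors:
--         if s.lower() in order_sector.lower():
--             return s
--     return None
-- ===== SOURCE B (Python) =====
-- def resolve_sector(order_sector, available_sectors):
--     if order_sector in available_sectors:
--         return order_sector
--     low = order_sector.lower()
--     fallback = None
--     for s in available_sectors: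
--         if s.lower() == low:
--             return s
--         if fallback is None and s.lower() in low:
--             fallback = s
--     return fallback
-- ===== Notes on version B (the rewrite author's own statement) =====
-- stated objective: simpler
-- what changed: Replaces A's two separate scans (case-insensitive pass, then substring pass) by a single pass that returns on a case match and records the first substring match as a fallback, computing order_sector.lower() once instead of on every iteration.
import Mathlib
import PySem

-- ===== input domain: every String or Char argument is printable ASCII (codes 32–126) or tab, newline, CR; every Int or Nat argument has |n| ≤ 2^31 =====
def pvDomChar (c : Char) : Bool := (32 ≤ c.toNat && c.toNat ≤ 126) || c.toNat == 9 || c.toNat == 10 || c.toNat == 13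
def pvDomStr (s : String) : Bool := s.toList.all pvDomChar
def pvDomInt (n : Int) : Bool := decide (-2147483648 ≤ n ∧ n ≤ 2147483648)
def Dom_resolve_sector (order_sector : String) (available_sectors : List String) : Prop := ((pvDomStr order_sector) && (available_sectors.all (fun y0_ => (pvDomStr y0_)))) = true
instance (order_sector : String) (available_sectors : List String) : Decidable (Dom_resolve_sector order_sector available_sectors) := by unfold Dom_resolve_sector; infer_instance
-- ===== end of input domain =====

-- B merges A's two scans (case-insensitive pass, then substring pass) into one pass
-- with a first-substring-match fallback; objective: simpler (one scan, lower() of the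
-- query computed once). Equivalence is total (A raises on no String input).

-- ===== PORT A =====
-- first loop of A: return first s with s.lower() == order_sector.lower()
def pvCaseScan (order_sector : String) : List String → Option String
  | [] => none
  | s :: rest =>
    if PySem.Str.lower s = PySem.Str.lower order_sector then some s
    else pvCaseScan order_sector rest

-- second loop of A: return first s with s.lower() in order_sector.lower()
def pvSubScan (order_sector : String) : List String → Option String
  | [] => none
  | s :: rest =>
    if PySem.Str.isIn (PySem.Str.lower s) (PySem.Str.lower order_sector) then some s
    else pvSubScan order_sector rest

def resolve_sector (order_sector : String) (available_sectors : List String) : Option String :=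
  if available_sectors.contains order_sector then some order_sector
  else
    match pvCaseScan order_sector available_sectors with
    | some s => some s
    | none => pvSubScan order_sector available_sectors

-- ===== PORT B =====
-- B's single loop: return on a case-insensitive match, record first substring match as fallback
def pvAltScan (low : String) : List String → Option String → Option String
  | [], fallback => fallback
  | s :: rest, fallback =>
    if PySem.Str.lower s = low then some s
    else pvAltScan low rest
      (if fallback.isNone && PySem.Str.isIn (PySem.Str.lower s) low then some s else fallback)

def resolve_sector_alt (order_sector : String) (available_sectors : List String) : Option String :=
  if available_sectors.contains order_sector then some order_sector
  else pvAltScan (PySem.Str.lower order_sector) available_sectors none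

-- ===== PRECONDITION & SPEC =====
def Spec_resolve_sector (order_sector : String) (available_sectors : List String) (out : Option String) : Prop := out = resolve_sector_alt order_sector available_sectors
instance (order_sector : String) (available_sectors : List String) (out : Option String) : Decidable (Spec_resolve_sector order_sector available_sectors out) := by unfold Spec_resolve_sector; infer_instance

-- ===== CLAIM (what is proved, stated in full; the proofs are below) =====
def Claim_equal_resolve_sector : Prop := ∀ (order_sector : String) (available_sectors : List String), Dom_resolve_sector order_sector available_sectors → Spec_resolve_sector order_sector available_sectors (resolve_sector order_sector available_sectors)

-- ===== LEMMAS AND PROOFS =====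

-- the loop invariant: the one-pass scan with fallback state equals "case scan, else fallback, else substring scan"
theorem pvAltScan_eq (o : String) (xs : List String) (fb : Option String) :
    pvAltScan (PySem.Str.lower o) xs fb =
      (match pvCaseScan o xs with
       | some s => some s
       | none => match fb with
         | some f => some f
         | none => pvSubScan o xs) := by
  induction xs generalizing fb with
  | nil => cases fb <;> simp [pvAltScan, pvCaseScan, pvSubScan]
  | cons s rest ih =>
    simp only [pvAltScan, pvCaseScan, pvSubScan]
    by_cases h1 : PySem.Str.lower s = PySem.Str.lower o
    · simp [h1]
    · cases fb with
      | some f => simp [h1, ih]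
      | none =>
        simp only [h1, if_false, ih, Option.isNone_none]
        cases pvCaseScan o rest with
        | some t => simp
        | none =>
          by_cases h2 :
              PySem.Chars.isIn (PySem.Chars.lower s.toList) (PySem.Chars.lower o.toList) = true <;>
            simp [h2]

-- ===== VERDICT (by name: the statement is the Claim_ definition above) =====
theorem resolve_sector_spec : Claim_equal_resolve_sector := by
  intro o xs _
  unfold Spec_resolve_sector resolve_sector resolve_sector_alt
  by_cases h : o ∈ xs
  · simp [h]
  · simp only [List.contains_eq_mem, h, decide_false, Bool.false_eq_true, if_false,
      pvAltScan_eq o xs none]
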